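-- pv_equiv track=rewrite | github.com/APT-Finder/Sensemaker | 2.Code/Sensemaker/Semantic-Structural Attributor/tools_aug.py | segment_by_tactic
-- ===== SOURCE A (Python) =====
-- from typing import List, Dict, Any, Optional
--
-- def tactic_of(ttp: str, tac_map: Dict[str, List[str]], prev_tac: Optional[str]=None) -> str:
--     opts = tac_map.get(ttp) or tac_map.get(ttp.split('.')[0]) or []
--     if prev_tac and prev_tac in opts:
--         return prev_tac
--     return opts[0] if opts else "UNK"
--
-- def segment_by_tactic(seq: List[str], tac_map: Dict[str, List[str]]):
--     segs=[]; cur=None; bucket=[]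
--     for t in seq:
--         tac = tactic_of(t, tac_map, prev_tac=cur)
--         if cur is None or tac==cur:
--             bucket.append(t); cur = tac if cur is None else cur
--         else:
--             segs.append((cur,bucket)); bucket=[t]; cur=tac
--     if bucket: segs.append((cur,bucket))
--     return segs
-- ===== SOURCE B (Python) =====
-- from typing import List, Dict, Optional
--
-- def tactic_of(ttp: str, tac_map: Dict[str, List[str]], prev_tac: Optional[str]=None) -> str:
--     opts = tac_map.get(ttp) or tac_map.get(ttp.split('.')[0]) or []
--     if prev_tac and prev_tac in opts:
--         return prev_tac
--     return opts[0] if opts else "UNK"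
--
-- def segment_by_tactic(seq: List[str], tac_map: Dict[str, List[str]]):
--     # pass 1: label every element (prev label threaded through)
--     labels = []
--     prev = None
--     for t in seq:
--         prev = tactic_of(t, tac_map, prev_tac=prev)
--         labels.append(prev)
--     # pass 2: group contiguous runs of equal labels
--     segs = []
--     pairs = list(zip(labels, seq))
--     while pairs:
--         lab = pairs[0][0]
--         k = 0
--         while k < len(pairs) and pairs[k][0] == lab:
--             k += 1
--         segs.append((lab, [t for _, t in pairs[:k]]))
--         pairs = pairs[k:]
--     return segs
-- ===== Notes on version B (the rewrite author's own statement) =====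
-- stated objective: idiomatic
-- what changed: Replaces A's interleaved accumulate-and-flush loop with two separate passes: first label every element (threading the previous label), then group contiguous runs of equal labels.
import Mathlib
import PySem

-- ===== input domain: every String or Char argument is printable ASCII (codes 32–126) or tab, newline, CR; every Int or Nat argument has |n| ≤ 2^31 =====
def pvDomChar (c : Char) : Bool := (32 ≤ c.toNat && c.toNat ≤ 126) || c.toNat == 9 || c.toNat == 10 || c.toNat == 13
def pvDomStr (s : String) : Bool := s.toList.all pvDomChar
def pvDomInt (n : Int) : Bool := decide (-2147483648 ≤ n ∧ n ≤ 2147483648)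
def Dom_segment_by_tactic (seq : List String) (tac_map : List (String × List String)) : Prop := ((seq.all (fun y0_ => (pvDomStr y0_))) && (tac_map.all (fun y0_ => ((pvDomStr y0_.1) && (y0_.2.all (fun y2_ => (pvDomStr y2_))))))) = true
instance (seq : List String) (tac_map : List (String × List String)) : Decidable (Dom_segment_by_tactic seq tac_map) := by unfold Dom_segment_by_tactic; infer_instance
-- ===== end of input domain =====

-- B separates labeling from grouping (a label pass, then a run-grouping pass) instead of A's
-- interleaved accumulate-and-flush loop; same cost, plainer decomposition.

-- ===== PORT A =====
-- shared module helper tactic_of (Source A and Source B contain the identical helper)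
def tacticOf (ttp : String) (tm : List (String × List String)) (prev : Option String) : String :=
  -- opts = tac_map.get(ttp) or tac_map.get(ttp.split('.')[0]) or []
  let d := PySem.Dict.mk tm
  let o1 := (PySem.Dict.get? d ttp).getD []
  let opts := if o1 ≠ [] then o1
              else (PySem.Dict.get? d (((PySem.Str.split? ttp ".").getD []).headD "")).getD []
  -- if prev_tac and prev_tac in opts: return prev_tac  (None and "" are falsy)
  match prev with
  | some p => if p ≠ "" ∧ opts.contains p then p else opts.headD "UNK"
  | none => opts.headD "UNK"

-- the body of A's for-loop, on state (segs, cur, bucket)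
def stepA (tm : List (String × List String))
    (st : List (String × List String) × Option String × List String) (t : String) :
    List (String × List String) × Option String × List String :=
  let tac := tacticOf t tm st.2.1
  match st.2.1 with
  | none => (st.1, some tac, st.2.2 ++ [t])
  | some c =>
    if tac = c then (st.1, some c, st.2.2 ++ [t])
    else (st.1 ++ [(c, st.2.2)], some tac, [t])

def segment_by_tactic (seq : List String) (tac_map : List (String × List String)) : List (String × List String) :=
  let st := seq.foldl (stepA tac_map) ([], none, [])
  -- 'if bucket: segs.append((cur,bucket))'; cur is always set once bucket is nonempty
  if st.2.2 ≠ [] then st.1 ++ [(st.2.1.getD "UNK", st.2.2)] else st.1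

-- ===== PORT B =====
-- grouping pass of Source B: peel the maximal run of the head label, recurse on the rest
def groupRuns (ps : List (String × String)) : List (String × List String) :=
  match ps with
  | [] => []
  | (l, t) :: rest =>
    (l, t :: (rest.takeWhile (fun p => p.1 == l)).map Prod.snd)
      :: groupRuns (rest.dropWhile (fun p => p.1 == l))
termination_by ps.length
decreasing_by
  simp only [List.length_cons]
  exact Nat.lt_succ_of_le (List.length_dropWhile_le _ _)

-- the body of Source B's labeling loop, on state (prev, labels)
def stepB (tm : List (String × List String)) (st : Option String × List String) (t : String) :
    Option String × List String :=
  let l := tacticOf t tm st.1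
  (some l, st.2 ++ [l])

def segment_by_tactic_alt (seq : List String) (tac_map : List (String × List String)) : List (String × List String) :=
  let labels := (seq.foldl (stepB tac_map) (none, [])).2
  groupRuns (labels.zip seq)

-- ===== PRECONDITION & SPEC =====
def Spec_segment_by_tactic (seq : List String) (tac_map : List (String × List String)) (out : List (String × List String)) : Prop := out = segment_by_tactic_alt seq tac_map
instance (seq : List String) (tac_map : List (String × List String)) (out : List (String × List String)) : Decidable (Spec_segment_by_tactic seq tac_map out) := by unfold Spec_segment_by_tactic; infer_instance

-- ===== CLAIM (what is proved, stated in full; the proofs are below) =====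
def Claim_equal_segment_by_tactic : Prop := ∀ (seq : List String) (tac_map : List (String × List String)), Dom_segment_by_tactic seq tac_map → Spec_segment_by_tactic seq tac_map (segment_by_tactic seq tac_map)

-- ===== LEMMAS AND PROOFS =====

-- the labeled pairs B's two passes produce, as one direct recursion
def pairsFrom (tm : List (String × List String)) (prev : Option String) : List String → List (String × String)
  | [] => []
  | t :: ts => (tacticOf t tm prev, t) :: pairsFrom tm (some (tacticOf t tm prev)) ts

-- prepend an open bucket labeled c onto a run-grouped list
def prependRun (c : String) (bucket : List String) (gs : List (String × List String)) : List (String × List String) :=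
  match gs with
  | [] => [(c, bucket)]
  | (l, run) :: rest => if l = c then (c, bucket ++ run) :: rest else (c, bucket) :: (l, run) :: rest

theorem groupRuns_cons (l t : String) (ps : List (String × String)) :
    groupRuns ((l, t) :: ps) =
      (l, t :: (ps.takeWhile (fun p => p.1 == l)).map Prod.snd)
        :: groupRuns (ps.dropWhile (fun p => p.1 == l)) := by
  rw [groupRuns]

theorem prependRun_groupRuns_cons (c : String) (bucket : List String) (t : String)
    (ps : List (String × String)) :
    prependRun c bucket (groupRuns ((c, t) :: ps)) = prependRun c (bucket ++ [t]) (groupRuns ps) := by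
  cases ps with
  | nil => simp [groupRuns_cons, groupRuns, prependRun]
  | cons hd tl =>
    obtain ⟨l', t'⟩ := hd
    by_cases h : l' = c
    · subst h
      rw [groupRuns_cons, groupRuns_cons]
      simp [prependRun]
    · rw [groupRuns_cons, groupRuns_cons]
      simp [h, prependRun, groupRuns_cons]

theorem groupRuns_eq_prependRun (l t : String) (ps : List (String × String)) :
    groupRuns ((l, t) :: ps) = prependRun l [t] (groupRuns ps) := by
  have h := prependRun_groupRuns_cons l [] t ps
  rw [show ([] : List String) ++ [t] = [t] from rfl] at h
  rw [← h, groupRuns_cons]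
  simp [prependRun]

-- A's loop, resumed from an open state (segs, some c, bucket ≠ []), finishes to
-- segs ++ the open bucket prepended onto the grouped labeling of the rest
theorem loopA_invariant (tm : List (String × List String)) (ts : List String) :
    ∀ (segs : List (String × List String)) (c : String) (bucket : List String), bucket ≠ [] →
    (let st := ts.foldl (stepA tm) (segs, some c, bucket)
     if st.2.2 ≠ [] then st.1 ++ [(st.2.1.getD "UNK", st.2.2)] else st.1)
    = segs ++ prependRun c bucket (groupRuns (pairsFrom tm (some c) ts)) := by
  induction ts with
  | nil =>
    intro segs c bucket hb
    simp [pairsFrom, groupRuns, prependRun, hb]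
  | cons t ts ih =>
    intro segs c bucket hb
    simp only [List.foldl_cons]
    by_cases h : tacticOf t tm (some c) = c
    · rw [show stepA tm (segs, some c, bucket) t = (segs, some c, bucket ++ [t]) by
        simp [stepA, h]]
      rw [ih segs c (bucket ++ [t]) (by simp)]
      rw [pairsFrom, h, prependRun_groupRuns_cons]
    · rw [show stepA tm (segs, some c, bucket) t
          = (segs ++ [(c, bucket)], some (tacticOf t tm (some c)), [t]) by
        simp [stepA, h]]
      rw [ih (segs ++ [(c, bucket)]) (tacticOf t tm (some c)) [t] (by simp)]
      rw [pairsFrom]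
      have e : prependRun c bucket
          (groupRuns ((tacticOf t tm (some c), t) :: pairsFrom tm (some (tacticOf t tm (some c))) ts))
          = (c, bucket) :: groupRuns ((tacticOf t tm (some c), t) :: pairsFrom tm (some (tacticOf t tm (some c))) ts) := by
        rw [groupRuns_cons]; simp [prependRun, h]
      rw [e, groupRuns_eq_prependRun]
      simp

-- B's labeling fold accumulates exactly the labels of pairsFrom
theorem labels_fold (tm : List (String × List String)) (ts : List String) :
    ∀ (prev : Option String) (acc : List String),
    (ts.foldl (stepB tm) (prev, acc)).2 = acc ++ (pairsFrom tm prev ts).map Prod.fst := by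
  induction ts with
  | nil => intro prev acc; simp [pairsFrom]
  | cons t ts ih =>
    intro prev acc
    simp only [List.foldl_cons, stepB, pairsFrom, List.map_cons]
    rw [ih]
    simp

-- zipping the labels back with the sequence recovers pairsFrom
theorem zip_labels (tm : List (String × List String)) (ts : List String) :
    ∀ (prev : Option String),
    ((pairsFrom tm prev ts).map Prod.fst).zip ts = pairsFrom tm prev ts := by
  induction ts with
  | nil => intro prev; simp [pairsFrom]
  | cons t ts ih =>
    intro prev
    simp only [pairsFrom, List.map_cons, List.zip_cons_cons, ih]

theorem segment_by_tactic_spec : Claim_equal_segment_by_tactic := by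
  intro seq tac_map _
  show segment_by_tactic seq tac_map = segment_by_tactic_alt seq tac_map
  unfold segment_by_tactic segment_by_tactic_alt
  rw [labels_fold, List.nil_append]
  simp only [zip_labels]
  cases seq with
  | nil => simp [pairsFrom, groupRuns]
  | cons t ts =>
    simp only [List.foldl_cons]
    rw [show stepA tac_map ([], none, []) t = ([], some (tacticOf t tac_map none), [t]) by
      simp [stepA]]
    rw [loopA_invariant tac_map ts [] (tacticOf t tac_map none) [t] (by simp)]
    rw [pairsFrom, groupRuns_eq_prependRun]
    rfl
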